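-- pv_equiv track=rewrite | github.com/yisuscc/tarea-proyecto-individual-laboratorio-Python-FP | src/journalists.py | separador
-- ===== SOURCE A (Python) =====
-- def separador(lista):
--     sep_1 = [] #guarda la separación por comas
--     sep_2= [] #guarda la separacion por /
--     #separacion por comas
--     for element in lista:
--         for item in element.split(','):
--             sep_1.append(item.strip())
--     # separacion por barras
--     for elemento in sep_1:
--         for item in elemento.split('/'):
--             item_1 = item.strip() #elimina espacios
--             item_2 = item_1.capitalize()#capitaliza
--             sep_2.append(item_2)
--     return sep_2
-- ===== SOURCE B (Python) =====
-- def separador(lista):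
--     # one pass: treat ',' and '/' as the same delimiter, then strip+capitalize each token
--     return [t.strip().capitalize()
--             for element in lista
--             for t in element.replace('/', ',').split(',')]
-- ===== Notes on version B (the rewrite author's own statement) =====
-- stated objective: simpler
-- what changed: Replaces the two staged passes with an intermediate list (split on ',' + strip, then split on '/' + strip + capitalize) by a single comprehension that unifies both delimiters via replace('/', ',') and does one split/strip/capitalize per token; equal because the final strip subsumes the intermediate one.
import Mathlib
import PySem

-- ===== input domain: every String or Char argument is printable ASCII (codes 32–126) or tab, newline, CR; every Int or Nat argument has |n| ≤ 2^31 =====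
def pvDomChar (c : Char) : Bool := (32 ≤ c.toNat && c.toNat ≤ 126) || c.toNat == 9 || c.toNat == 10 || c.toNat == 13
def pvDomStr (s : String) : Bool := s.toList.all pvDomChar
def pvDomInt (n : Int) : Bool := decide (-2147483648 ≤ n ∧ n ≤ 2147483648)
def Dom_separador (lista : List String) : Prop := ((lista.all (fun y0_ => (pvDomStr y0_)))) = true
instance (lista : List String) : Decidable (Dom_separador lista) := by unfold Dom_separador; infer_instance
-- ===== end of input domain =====

-- B collapses A's two staged passes (comma split + strip into an intermediate list,
-- then slash split + strip + capitalize) into one comprehension that unifies both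
-- delimiters with replace('/', ',') — objective: simpler (no intermediate list).

-- Python str.capitalize, exact on ASCII (shared helper: both Pythons call .capitalize())
def pyCapitalize (s : String) : String :=
  match s.toList with
  | [] => ""
  | c :: cs => String.ofList (PySem.Chars.upperChar c :: cs.map PySem.Chars.lowerChar)

-- ===== PORT A =====
def separador (lista : List String) : List String :=
  let sep_1 : List String :=
    lista.foldl (fun acc element =>
      (PySem.Chars.splitOn element.toList [',']).foldl
        (fun acc item => acc ++ [PySem.Str.strip (String.ofList item)]) acc) []
  sep_1.foldl (fun acc elemento =>
    (PySem.Chars.splitOn elemento.toList ['/']).foldl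
      (fun acc item =>
        let item_1 := PySem.Str.strip (String.ofList item)
        let item_2 := pyCapitalize item_1
        acc ++ [item_2]) acc) []

-- ===== PORT B =====
def separador_alt (lista : List String) : List String :=
  lista.flatMap (fun element =>
    (PySem.Chars.splitOn (PySem.Chars.replace element.toList ['/'] [',']) [',']).map
      (fun t => pyCapitalize (PySem.Str.strip (String.ofList t))))

-- ===== PRECONDITION & SPEC =====
def Spec_separador (lista : List String) (out : List String) : Prop := out = separador_alt lista
instance (lista : List String) (out : List String) : Decidable (Spec_separador lista out) := by unfold Spec_separador; infer_instance

-- ===== CLAIM (what is proved, stated in full; the proofs are below) =====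
def Claim_equal_separador : Prop := ∀ (lista : List String), Dom_separador lista → Spec_separador lista (separador lista)

-- ===== LEMMAS AND PROOFS =====

-- simple structural single-character splitter (proof-only reference function)
def splitC (c : Char) : List Char → List (List Char)
  | [] => [[]]
  | x :: xs => if x = c then [] :: splitC c xs else (splitC c xs).modifyHead (x :: ·)

theorem splitC_ne_nil (c : Char) (l : List Char) : splitC c l ≠ [] := by
  induction l with
  | nil => simp [splitC]
  | cons x xs ih =>
    simp only [splitC]
    split_ifs
    · simp
    · cases h : splitC c xs with
      | nil => exact absurd h ih
      | cons a t => simp [List.modifyHead]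

theorem modifyHead_nil_append {α : Type} (S : List (List α)) :
    S.modifyHead (fun a => ([] : List α) ++ a) = S := by
  cases S <;> simp [List.modifyHead]

theorem modifyHead_append_of_ne_nil {α : Type} (g : α → α) (S T : List α) (hS : S ≠ []) :
    (S ++ T).modifyHead g = S.modifyHead g ++ T := by
  cases S with
  | nil => exact absurd rfl hS
  | cons a t => simp [List.modifyHead]

theorem modifyLast_cons_of_ne_nil {α : Type} (f : α → α) (a : α) (S : List α) (hS : S ≠ []) :
    List.modifyLast f (a :: S) = a :: List.modifyLast f S := by
  rw [show a :: S = [a] ++ S by rfl, List.modifyLast_append_of_right_ne_nil _ _ _ hS]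
  simp

theorem go_eq (c : Char) (l cur : List Char) (acc : List (List Char)) (fuel : Nat)
    (h : l.length ≤ fuel) :
    PySem.Chars.splitOn.go [c] fuel l cur acc
      = acc.reverse ++ (splitC c l).modifyHead (cur.reverse ++ ·) := by
  induction l generalizing fuel cur acc with
  | nil =>
    cases fuel with
    | zero =>
      show ((cur.reverse ++ []) :: acc).reverse = _
      simp [splitC, List.modifyHead]
    | succ f =>
      show (cur.reverse :: acc).reverse = _
      simp [splitC, List.modifyHead]
  | cons x xs ih =>
    cases fuel with
    | zero => simp at h
    | succ f =>
      have hf : xs.length ≤ f := by simpa using h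
      have hstep : PySem.Chars.splitOn.go [c] (f+1) (x::xs) cur acc
          = if [c].isPrefixOf (x::xs) then
              PySem.Chars.splitOn.go [c] f (List.drop 1 (x::xs)) [] (cur.reverse :: acc)
            else PySem.Chars.splitOn.go [c] f xs (x :: cur) acc := rfl
      have hpref : ([c].isPrefixOf (x::xs)) = (c == x) := by simp [List.isPrefixOf]
      rw [hstep]
      by_cases hxc : x = c
      · have hcx : (c == x) = true := by simp [hxc]
        rw [hpref, hcx]
        simp only [if_true, List.drop_succ_cons, List.drop_zero]
        rw [ih [] (cur.reverse :: acc) f hf]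
        simp only [splitC, if_pos hxc, List.reverse_nil, List.reverse_cons, List.modifyHead_cons]
        rw [modifyHead_nil_append]
        simp only [List.append_nil, List.append_assoc, List.singleton_append]
      · have : (c == x) = false := by simp [Ne.symm hxc]
        rw [hpref, this]
        simp only [Bool.false_eq_true, if_false]
        rw [ih (x :: cur) acc f hf]
        simp only [splitC, if_neg hxc]
        cases hS : splitC c xs with
        | nil => exact absurd hS (splitC_ne_nil c xs)
        | cons a t => simp [List.modifyHead]

theorem splitOn_eq (c : Char) (l : List Char) :
    PySem.Chars.splitOn l [c] = splitC c l := by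
  show PySem.Chars.splitOn.go [c] (l.length + 1) l [] [] = _
  rw [go_eq c l [] [] (l.length + 1) (by omega)]
  cases hS : splitC c l with
  | nil => exact absurd hS (splitC_ne_nil c l)
  | cons a t => simp [List.modifyHead]

theorem replace_go_eq (o n : Char) (l acc : List Char) (fuel : Nat) (h : l.length ≤ fuel) :
    PySem.Chars.replace.go [o] [n] fuel l acc
      = acc.reverse ++ l.map (fun c => if c = o then n else c) := by
  induction l generalizing fuel acc with
  | nil =>
    cases fuel with
    | zero => show acc.reverse ++ [] = _; simp
    | succ f => show acc.reverse = _; simp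
  | cons x xs ih =>
    cases fuel with
    | zero => simp at h
    | succ f =>
      have hf : xs.length ≤ f := by simpa using h
      have hstep : PySem.Chars.replace.go [o] [n] (f+1) (x::xs) acc
          = if [o].isPrefixOf (x::xs) then
              PySem.Chars.replace.go [o] [n] f (List.drop 1 (x::xs)) ([n].reverse ++ acc)
            else PySem.Chars.replace.go [o] [n] f xs (x :: acc) := rfl
      have hpref : ([o].isPrefixOf (x::xs)) = (o == x) := by simp [List.isPrefixOf]
      rw [hstep, hpref]
      by_cases hxo : x = o
      · subst hxo
        simp only [beq_self_eq_true, if_true, List.drop_succ_cons, List.drop_zero]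
        rw [ih ([n].reverse ++ acc) f hf]
        simp
      · have : (o == x) = false := by simp [Ne.symm hxo]
        rw [this]
        simp only [Bool.false_eq_true, if_false]
        rw [ih (x :: acc) f hf]
        simp [hxo]

theorem replace_eq (o n : Char) (l : List Char) :
    PySem.Chars.replace l [o] [n] = l.map (fun c => if c = o then n else c) := by
  show PySem.Chars.replace.go [o] [n] l.length l [] = _
  rw [replace_go_eq o n l [] l.length le_rfl]
  simp

-- replacing '/' by ',' and splitting on ',' = splitting on ',' then on '/'
theorem split_replace (l : List Char) :
    splitC ',' (l.map (fun c => if c = '/' then ',' else c))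
      = (splitC ',' l).flatMap (splitC '/') := by
  induction l with
  | nil => simp [splitC]
  | cons x xs ih =>
    by_cases hx1 : x = ','
    · subst hx1
      simp only [List.map_cons, if_neg (by decide : ¬(',' = '/'))]
      simp only [splitC, ih]
      simp [splitC]
    · by_cases hx2 : x = '/'
      · subst hx2
        simp only [List.map_cons]
        simp only [splitC, if_neg (by decide : ¬('/' = ','))]
        cases hS : splitC ',' xs with
        | nil => exact absurd hS (splitC_ne_nil ',' xs)
        | cons a t =>
          rw [hS] at ih
          simp only [List.modifyHead_cons, List.flatMap_cons] at *
          simp only [splitC]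
          rw [ih]
          simp
      · simp only [List.map_cons, if_neg hx2]
        simp only [splitC, if_neg hx1, ih]
        cases hS : splitC ',' xs with
        | nil => exact absurd hS (splitC_ne_nil ',' xs)
        | cons a t =>
          simp only [List.modifyHead_cons, List.flatMap_cons]
          rw [modifyHead_append_of_ne_nil _ _ _ (splitC_ne_nil '/' a)]
          simp only [splitC, if_neg hx2]

theorem rstrip_snoc_ws (u : List Char) (x : Char) (hx : PySem.Chars.isspace x = true) :
    PySem.Chars.rstrip (u ++ [x]) = PySem.Chars.rstrip u := by
  simp [PySem.Chars.rstrip, hx]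

theorem rstrip_snoc_not_ws (u : List Char) (x : Char) (hx : PySem.Chars.isspace x = false) :
    PySem.Chars.rstrip (u ++ [x]) = u ++ [x] := by
  simp [PySem.Chars.rstrip, hx]

theorem strip_cons_ws (a : List Char) (x : Char) (hx : PySem.Chars.isspace x = true) :
    PySem.Chars.strip (x :: a) = PySem.Chars.strip a := by
  simp [PySem.Chars.strip, PySem.Chars.lstrip, List.dropWhile, hx]

theorem strip_snoc_ws (a : List Char) (x : Char) (hx : PySem.Chars.isspace x = true) :
    PySem.Chars.strip (a ++ [x]) = PySem.Chars.strip a := by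
  show PySem.Chars.rstrip (PySem.Chars.lstrip (a ++ [x])) = PySem.Chars.rstrip (PySem.Chars.lstrip a)
  unfold PySem.Chars.lstrip
  rw [List.dropWhile_append]
  by_cases he : (List.dropWhile PySem.Chars.isspace a).isEmpty
  · rw [if_pos he]
    rw [List.isEmpty_iff] at he
    rw [he]
    simp [List.dropWhile, hx]
  · rw [if_neg he]
    exact rstrip_snoc_ws _ x hx

theorem map_modifyHead_of_fix {α β : Type} (f : α → β) (g : α → α) (S : List α)
    (h : ∀ a, f (g a) = f a) : (S.modifyHead g).map f = S.map f := by
  cases S <;> simp [List.modifyHead, h]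

theorem map_modifyLast_of_fix {α β : Type} (f : α → β) (g : α → α) (S : List α)
    (h : ∀ a, f (g a) = f a) : (S.modifyLast g).map f = S.map f := by
  rcases S.eq_nil_or_concat with rfl | ⟨u, b, rfl⟩
  · rfl
  · simp only [List.concat_eq_append]
    rw [List.modifyLast_concat]
    simp [h]

theorem modifyLast_singleton {α : Type} (f : α → α) (a : α) :
    List.modifyLast f [a] = [f a] := by
  simpa using List.modifyLast_concat f a []

theorem modifyHead_modifyLast_comm {α : Type} (g f : α → α) (S : List α)
    (h : ∀ a, g (f a) = f (g a)) :
    (S.modifyLast f).modifyHead g = (S.modifyHead g).modifyLast f := by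
  cases S with
  | nil => rfl
  | cons a t =>
    cases t with
    | nil =>
      rw [modifyLast_singleton, List.modifyHead_cons, List.modifyHead_cons,
          modifyLast_singleton, h]
    | cons b u =>
      rw [modifyLast_cons_of_ne_nil f a (b :: u) (by simp), List.modifyHead_cons,
          List.modifyHead_cons, modifyLast_cons_of_ne_nil f (g a) (b :: u) (by simp)]

theorem splitC_snoc (c : Char) (l : List Char) (x : Char) :
    splitC c (l ++ [x])
      = if x = c then splitC c l ++ [[]] else (splitC c l).modifyLast (· ++ [x]) := by
  induction l with
  | nil =>
    simp only [List.nil_append, splitC]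
    split_ifs
    · rfl
    · rw [show ([[]] : List (List Char)) = [] ++ [[]] by rfl, List.modifyLast_concat]
      simp [List.modifyHead]
  | cons y l ih =>
    simp only [List.cons_append, splitC, ih]
    by_cases hy : y = c
    · simp only [if_pos hy]
      split_ifs with hx
      · simp
      · rw [modifyLast_cons_of_ne_nil _ _ _ (splitC_ne_nil c l)]
    · simp only [if_neg hy]
      split_ifs with hx
      · rw [modifyHead_append_of_ne_nil _ _ _ (splitC_ne_nil c l)]
      · exact modifyHead_modifyLast_comm _ _ _ (fun a => by simp)

theorem map_strip_splitC_lstrip (c : Char) (hc : PySem.Chars.isspace c = false) (p : List Char) :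
    (splitC c (PySem.Chars.lstrip p)).map PySem.Chars.strip
      = (splitC c p).map PySem.Chars.strip := by
  induction p with
  | nil => rfl
  | cons x t ih =>
    by_cases hx : PySem.Chars.isspace x = true
    · have h1 : PySem.Chars.lstrip (x :: t) = PySem.Chars.lstrip t := by
        simp [PySem.Chars.lstrip, List.dropWhile, hx]
      have hxc : x ≠ c := fun h => by rw [h] at hx; rw [hc] at hx; exact Bool.false_ne_true hx
      rw [h1, ih]
      simp only [splitC, if_neg hxc]
      rw [map_modifyHead_of_fix _ _ _ (fun a => strip_cons_ws a x hx)]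
    · have h1 : PySem.Chars.lstrip (x :: t) = x :: t := by
        simp only [Bool.not_eq_true] at hx
        simp [PySem.Chars.lstrip, List.dropWhile, hx]
      rw [h1]

theorem map_strip_splitC_rstrip (c : Char) (hc : PySem.Chars.isspace c = false) (p : List Char) :
    (splitC c (PySem.Chars.rstrip p)).map PySem.Chars.strip
      = (splitC c p).map PySem.Chars.strip := by
  induction p using List.reverseRecOn with
  | nil => rfl
  | append_singleton l x ih =>
    by_cases hx : PySem.Chars.isspace x = true
    · have hxc : x ≠ c := fun h => by rw [h] at hx; rw [hc] at hx; exact Bool.false_ne_true hx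
      rw [rstrip_snoc_ws l x hx, ih, splitC_snoc, if_neg hxc]
      rw [map_modifyLast_of_fix _ _ _ (fun a => strip_snoc_ws a x hx)]
    · simp only [Bool.not_eq_true] at hx
      rw [rstrip_snoc_not_ws l x hx]

theorem map_strip_splitC_strip (c : Char) (hc : PySem.Chars.isspace c = false) (p : List Char) :
    (splitC c (PySem.Chars.strip p)).map PySem.Chars.strip
      = (splitC c p).map PySem.Chars.strip := by
  show (splitC c (PySem.Chars.rstrip (PySem.Chars.lstrip p))).map PySem.Chars.strip = _
  rw [map_strip_splitC_rstrip c hc, map_strip_splitC_lstrip c hc]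

theorem strip_ofList (cs : List Char) :
    PySem.Str.strip (String.ofList cs) = String.ofList (PySem.Chars.strip cs) := by
  simp [PySem.Str.strip]

-- per-element equality of the two pipelines
theorem element_eq (e : String) :
    ((splitC ',' e.toList).map (fun item => PySem.Str.strip (String.ofList item))).flatMap
        (fun elemento => (splitC '/' elemento.toList).map
          (fun item => pyCapitalize (PySem.Str.strip (String.ofList item))))
      = (splitC ',' (e.toList.map (fun c => if c = '/' then ',' else c))).map
          (fun t => pyCapitalize (PySem.Str.strip (String.ofList t))) := by
  rw [split_replace, List.flatMap_map, List.map_flatMap]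
  apply List.flatMap_congr -- reduce to each comma-piece p
  intro p _
  have h1 : (PySem.Str.strip (String.ofList p)).toList = PySem.Chars.strip p := by
    rw [strip_ofList]; simp
  rw [h1]
  have key := map_strip_splitC_strip '/' (by decide) p
  have : ∀ X : List (List Char),
      X.map (fun item => pyCapitalize (PySem.Str.strip (String.ofList item)))
        = (X.map PySem.Chars.strip).map (fun cs => pyCapitalize (String.ofList cs)) := by
    intro X
    rw [List.map_map]
    apply List.map_congr_left
    intro a _
    simp [Function.comp_apply, strip_ofList]
  rw [this, this, key]

-- ===== VERDICT (by name: the statement is the Claim_ definition above) =====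
theorem separador_spec : Claim_equal_separador := by
  intro lista _
  show separador lista = separador_alt lista
  unfold separador separador_alt
  simp only [splitOn_eq, replace_eq]
  have inner1 : ∀ (acc : List String) (e : String),
      (splitC ',' e.toList).foldl
          (fun acc item => acc ++ [PySem.Str.strip (String.ofList item)]) acc
        = acc ++ (splitC ',' e.toList).map (fun item => PySem.Str.strip (String.ofList item)) := by
    intro acc e
    exact PySem.List.foldl_append_singleton_eq_map _ _ _
  have inner2 : ∀ (acc : List String) (e : String),
      (splitC '/' e.toList).foldl
          (fun acc item => acc ++ [pyCapitalize (PySem.Str.strip (String.ofList item))]) acc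
        = acc ++ (splitC '/' e.toList).map
            (fun item => pyCapitalize (PySem.Str.strip (String.ofList item))) := by
    intro acc e
    exact PySem.List.foldl_append_singleton_eq_map _ _ _
  simp only [inner1, inner2]
  rw [PySem.List.foldl_append_eq_flatMap, PySem.List.foldl_append_eq_flatMap]
  simp only [List.nil_append]
  rw [List.flatMap_assoc]
  apply List.flatMap_congr
  intro e _
  exact element_eq e
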